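-- pv_equiv track=rewrite | github.com/eyeonechi/twitter-language-identification | src/twitter_language_identification.py | compareSentences
-- ===== SOURCE A (Python) =====
-- def compareSentences(s1, s2):
--     score = 0
--     s1 = s1.split(' ')
--     s2 = s2.split(' ')
--     for word in s1:
--         word = word.lower()
--     for word in s2:
--         word = word.lower()
--     for i in range(min(len(s1), len(s2))):
--         distance = levenshteinDistance(s1[i], s2[i])
--         score += distance
--     return score
--
-- memo = {}
--
-- def levenshteinDistance(w1, w2):
--     if w1 == "":
--         return len(w2)
--     if w2 == "":
--         return len(w1)
--     cost = 0 if w1[-1] == w2[-1] else 1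
--     i1 = (w1[:-1], w2)
--     if not i1 in memo:
--         memo[i1] = levenshteinDistance(*i1)
--     i2 = (w1, w2[:-1])
--     if not i2 in memo:
--         memo[i2] = levenshteinDistance(*i2)
--     i3 = (w1[:-1], w2[:-1])
--     if not i3 in memo:
--         memo[i3] = levenshteinDistance(*i3)
--     return min([memo[i1] + 1, memo[i2] + 1, memo[i3] + cost])
-- ===== SOURCE B (Python) =====
-- def compareSentences(s1, s2):
--     words1 = s1.split(' ')
--     words2 = s2.split(' ')
--     return sum(_lev(w1, w2) for w1, w2 in zip(words1, words2))
--
-- def _lev(w1, w2):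
--     # iterative bottom-up Levenshtein with a rolling row
--     prev = list(range(len(w2) + 1))
--     for i, c1 in enumerate(w1):
--         last = i + 1
--         curr = [last]
--         for c2, pj, pj1 in zip(w2, prev, prev[1:]):
--             last = min(pj1 + 1, last + 1, pj + (0 if c1 == c2 else 1))
--             curr.append(last)
--         prev = curr
--     return prev[-1]
-- ===== Notes on version B (the rewrite author's own statement) =====
-- stated objective: faster
-- what changed: The globally-memoized top-down recursive Levenshtein (dict keyed by (prefix,prefix) string pairs) is replaced by an iterative bottom-up rolling-row DP, and the index loop over range(min(len,len)) by a sum over zip(words1, words2).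
import Mathlib
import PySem

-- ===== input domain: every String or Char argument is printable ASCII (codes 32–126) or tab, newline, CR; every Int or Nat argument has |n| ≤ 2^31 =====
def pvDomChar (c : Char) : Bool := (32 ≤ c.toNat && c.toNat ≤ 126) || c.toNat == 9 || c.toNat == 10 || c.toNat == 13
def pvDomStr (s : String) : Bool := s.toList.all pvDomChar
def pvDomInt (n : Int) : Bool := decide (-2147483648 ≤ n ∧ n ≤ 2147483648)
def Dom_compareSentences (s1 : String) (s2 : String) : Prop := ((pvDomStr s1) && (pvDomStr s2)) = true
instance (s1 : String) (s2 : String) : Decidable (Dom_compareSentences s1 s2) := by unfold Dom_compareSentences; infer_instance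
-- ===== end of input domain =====

-- B replaces A's globally-memoized recursive Levenshtein with an iterative rolling-row DP
-- summed over zipped words (objective: faster, measured; same return value).

-- ===== PORT A =====
-- words are represented as List Char; the memo dict is threaded through the recursion
-- (Python's memo is a module-global pure cache of correct distances, so starting each
-- call with the cache state reaching it gives the same return value).
abbrev MemoA := PySem.Dict (List Char × List Char) Int

-- levenshteinDistance of A, with the memo threaded as state.
def levA (w1 w2 : List Char) (m : MemoA) : Int × MemoA :=
  if h1 : w1 = [] then ((w2.length : Int), m)
  else if h2 : w2 = [] then ((w1.length : Int), m)
  else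
    -- cost = 0 if w1[-1] == w2[-1] else 1   (both nonempty here, so getLastD is exact)
    let cost : Int := if w1.getLastD 'a' = w2.getLastD 'a' then 0 else 1
    let k1 := (w1.dropLast, w2)
    let m1 := if (m.get? k1).isSome then m
              else let r := levA w1.dropLast w2 m; r.2.insert k1 r.1
    let k2 := (w1, w2.dropLast)
    let m2 := if (m1.get? k2).isSome then m1
              else let r := levA w1 w2.dropLast m1; r.2.insert k2 r.1
    let k3 := (w1.dropLast, w2.dropLast)
    let m3 := if (m2.get? k3).isSome then m2
              else let r := levA w1.dropLast w2.dropLast m2; r.2.insert k3 r.1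
    (min (min (m3.getD k1 0 + 1) (m3.getD k2 0 + 1)) (m3.getD k3 0 + cost), m3)
termination_by w1.length + w2.length
decreasing_by
  all_goals
    first
    | (have hl1 : 0 < w1.length := List.length_pos_of_ne_nil h1
       simp [List.length_dropLast]; omega)
    | (have hl2 : 0 < w2.length := List.length_pos_of_ne_nil h2
       simp [List.length_dropLast]; omega)

def compareSentences (s1 : String) (s2 : String) : Int :=
  let l1 := PySem.Chars.splitOn s1.toList [' ']
  let l2 := PySem.Chars.splitOn s2.toList [' ']
  -- the two 'for word in …: word = word.lower()' loops only rebind the loop variable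
  -- and have no effect; they are ported as nothing
  let n : Int := min l1.length l2.length
  ((PySem.List.pyRange 0 n 1).foldl
    (fun (st : Int × MemoA) i =>
      let r := levA (PySem.List.pyGetD l1 i []) (PySem.List.pyGetD l2 i []) st.2
      (st.1 + r.1, r.2))
    (0, PySem.Dict.empty)).1

-- ===== PORT B =====
-- inner loop of Source B: for c2, pj, pj1 in zip(w2, prev, prev[1:]) building curr past its head
def innerB (c1 : Char) : List Char → List Int → Int → List Int
  | c2 :: cs, pj :: pj1 :: ps, last =>
      let last' := min (min (pj1 + 1) (last + 1)) (pj + if c1 = c2 then 0 else 1)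
      last' :: innerB c1 cs (pj1 :: ps) last'
  | _, _, _ => []

-- outer loop of Source B: for i, c1 in enumerate(w1), replacing prev by the next row
def rowsB (w2 : List Char) : List Char → Nat → List Int → List Int
  | [], _, prev => prev
  | c1 :: cs, i, prev => rowsB w2 cs (i + 1) (((i : Int) + 1) :: innerB c1 w2 prev ((i : Int) + 1))

def levB (w1 w2 : List Char) : Int :=
  let prev0 := (List.range (w2.length + 1)).map Int.ofNat
  (rowsB w2 w1 0 prev0).getLastD 0   -- prev[-1]; the row is never empty

def compareSentences_alt (s1 : String) (s2 : String) : Int :=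
  let l1 := PySem.Chars.splitOn s1.toList [' ']
  let l2 := PySem.Chars.splitOn s2.toList [' ']
  ((l1.zip l2).map (fun p => levB p.1 p.2)).sum

-- ===== PRECONDITION & SPEC =====
def Spec_compareSentences (s1 : String) (s2 : String) (out : Int) : Prop := out = compareSentences_alt s1 s2
instance (s1 : String) (s2 : String) (out : Int) : Decidable (Spec_compareSentences s1 s2 out) := by unfold Spec_compareSentences; infer_instance

-- ===== CLAIM (what is proved, stated in full; the proofs are below) =====
def Claim_equal_compareSentences : Prop := ∀ (s1 : String) (s2 : String), Dom_compareSentences s1 s2 → Spec_compareSentences s1 s2 (compareSentences s1 s2)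

-- ===== LEMMAS AND PROOFS =====

-- the mathematical Levenshtein distance, by structural recursion on the HEADS of the
-- reversed words (A and B both recurse/iterate over prefixes, i.e. drop LAST characters)
def levF : List Char → List Char → Int
  | [], b => b.length
  | a, [] => a.length
  | x :: a, y :: b =>
      min (min (levF a (y :: b) + 1) (levF (x :: a) b + 1))
          (levF a b + if x = y then 0 else 1)

def S (a b : List Char) : Int := levF a.reverse b.reverse

lemma levF_nil_right : ∀ a : List Char, levF a [] = a.length
  | [] => by simp [levF]
  | _ :: _ => by simp [levF]

lemma S_nil_left (b : List Char) : S [] b = b.length := by simp [S, levF]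

lemma S_nil_right (a : List Char) : S a [] = a.length := by
  simp [S, levF_nil_right]

lemma S_snoc (a b : List Char) (x y : Char) :
    S (a ++ [x]) (b ++ [y]) =
      min (min (S a (b ++ [y]) + 1) (S (a ++ [x]) b + 1))
          (S a b + if x = y then 0 else 1) := by
  simp [S, levF]

lemma S_rec (w1 w2 : List Char) (h1 : w1 ≠ []) (h2 : w2 ≠ []) :
    S w1 w2 =
      min (min (S w1.dropLast w2 + 1) (S w1 w2.dropLast + 1))
          (S w1.dropLast w2.dropLast + if w1.getLastD 'a' = w2.getLastD 'a' then 0 else 1) := by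
  conv_lhs => rw [← List.dropLast_append_getLast h1, ← List.dropLast_append_getLast h2]
  rw [S_snoc]
  rw [List.dropLast_append_getLast h1, List.dropLast_append_getLast h2]
  simp [List.getLastD_eq_getLast?, List.getLast?_eq_some_getLast h1, List.getLast?_eq_some_getLast h2]

-- ---- correctness of port A's memoized recursion ----

def InvA (m : MemoA) : Prop := ∀ k v, m.get? k = some v → v = S k.1 k.2

lemma invA_insert {m : MemoA} (h : InvA m) (k : List Char × List Char)
    (hv : v = S k.1 k.2) : InvA (m.insert k v) := by
  intro k' v' hk'
  rw [PySem.Dict.get?_insert] at hk'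
  split at hk'
  · cases hk'; subst_vars; rfl
  · exact h k' v' hk'

lemma getD_of_inv {m : MemoA} (h : InvA m) {k : List Char × List Char}
    (hk : (m.get? k).isSome) : m.getD k 0 = S k.1 k.2 := by
  obtain ⟨v, hv⟩ := Option.isSome_iff_exists.mp hk
  rw [PySem.Dict.getD_of_get?_eq_some _ _ hv]
  exact h k v hv

lemma isSome_insert {m : MemoA} {k k' : List Char × List Char} {v : Int}
    (h : (m.get? k').isSome) : ((m.insert k v).get? k').isSome := by
  rw [PySem.Dict.get?_insert]
  split <;> simp [h]

-- one 'if key not in memo: memo[key] = lev(*key)' step preserves the invariant,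
-- makes the key present, and keeps every present key present
lemma stepA (u v : List Char) (m : MemoA) (hInv : InvA m)
    (hgood : (levA u v m).1 = S u v ∧ InvA (levA u v m).2 ∧
      (∀ k, (m.get? k).isSome → ((levA u v m).2.get? k).isSome)) :
    InvA (if (m.get? (u, v)).isSome then m
          else (levA u v m).2.insert (u, v) (levA u v m).1) ∧
    (((if (m.get? (u, v)).isSome then m
          else (levA u v m).2.insert (u, v) (levA u v m).1).get? (u, v)).isSome) ∧
    (∀ k, (m.get? k).isSome →
      (((if (m.get? (u, v)).isSome then m
          else (levA u v m).2.insert (u, v) (levA u v m).1).get? k).isSome)) := by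
  split
  · exact ⟨hInv, by assumption, fun k hk => hk⟩
  · refine ⟨invA_insert hgood.2.1 (u, v) hgood.1, ?_, ?_⟩
    · simp [PySem.Dict.get?_insert_self]
    · intro k hk
      exact isSome_insert (hgood.2.2 k hk)

lemma levA_good : ∀ (n : Nat) (w1 w2 : List Char) (m : MemoA),
    w1.length + w2.length ≤ n → InvA m →
    (levA w1 w2 m).1 = S w1 w2 ∧ InvA (levA w1 w2 m).2 ∧
      (∀ k, (m.get? k).isSome → ((levA w1 w2 m).2.get? k).isSome) := by
  intro n
  induction n with
  | zero =>
      intro w1 w2 m hle hInv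
      have e1 : w1 = [] := List.length_eq_zero_iff.mp (by omega)
      rw [levA]
      simp [e1, S_nil_left, hInv]
  | succ n ih =>
      intro w1 w2 m hle hInv
      by_cases h1 : w1 = []
      · rw [levA]; simp [h1, S_nil_left, hInv]
      by_cases h2 : w2 = []
      · rw [levA]; simp [h1, h2, S_nil_right, hInv]
      have hl1 : 0 < w1.length := List.length_pos_of_ne_nil h1
      have hl2 : 0 < w2.length := List.length_pos_of_ne_nil h2
      have hd1 : w1.dropLast.length = w1.length - 1 := List.length_dropLast (xs := w1)
      have hd2 : w2.dropLast.length = w2.length - 1 := List.length_dropLast (xs := w2)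
      -- step 1
      have G1 := stepA w1.dropLast w2 m hInv (ih _ _ _ (by omega) hInv)
      set m1 := (if (m.get? (w1.dropLast, w2)).isSome then m
          else (levA w1.dropLast w2 m).2.insert (w1.dropLast, w2) (levA w1.dropLast w2 m).1)
        with hm1
      -- step 2
      have G2 := stepA w1 w2.dropLast m1 G1.1 (ih _ _ _ (by omega) G1.1)
      set m2 := (if (m1.get? (w1, w2.dropLast)).isSome then m1
          else (levA w1 w2.dropLast m1).2.insert (w1, w2.dropLast) (levA w1 w2.dropLast m1).1)
        with hm2
      -- step 3
      have G3 := stepA w1.dropLast w2.dropLast m2 G2.1 (ih _ _ _ (by omega) G2.1)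
      set m3 := (if (m2.get? (w1.dropLast, w2.dropLast)).isSome then m2
          else (levA w1.dropLast w2.dropLast m2).2.insert (w1.dropLast, w2.dropLast)
            (levA w1.dropLast w2.dropLast m2).1)
        with hm3
      have hk1 : (m3.get? (w1.dropLast, w2)).isSome := G3.2.2 _ (G2.2.2 _ G1.2.1)
      have hk2 : (m3.get? (w1, w2.dropLast)).isSome := G3.2.2 _ G2.2.1
      have hk3 : (m3.get? (w1.dropLast, w2.dropLast)).isSome := G3.2.1
      have hres : levA w1 w2 m =
          (min (min (m3.getD (w1.dropLast, w2) 0 + 1) (m3.getD (w1, w2.dropLast) 0 + 1))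
            (m3.getD (w1.dropLast, w2.dropLast) 0 +
              if w1.getLastD 'a' = w2.getLastD 'a' then 0 else 1), m3) := by
        rw [levA]
        simp only [dif_neg h1, dif_neg h2, hm1, hm2, hm3]
      refine ⟨?_, ?_, ?_⟩
      · rw [hres]
        rw [getD_of_inv G3.1 hk1, getD_of_inv G3.1 hk2, getD_of_inv G3.1 hk3]
        exact (S_rec w1 w2 h1 h2).symm
      · rw [hres]
        exact G3.1
      · intro k hk
        rw [hres]
        exact G3.2.2 _ (G2.2.2 _ (G1.2.2 _ hk))

-- ---- correctness of port B's rolling-row DP ----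

-- the row of prefix distances: rowAux p q cs = [S p (q ++ cs.take k) | k = 0 .. cs.length]
def rowAux (p : List Char) : List Char → List Char → List Int
  | q, [] => [S p q]
  | q, c :: cs => S p q :: rowAux p (q ++ [c]) cs

lemma rowAux_head (p q cs) : rowAux p q cs = S p q :: (rowAux p q cs).tail := by
  cases cs <;> rfl

lemma innerB_spec (c1 : Char) (p : List Char) : ∀ (cs q : List Char),
    innerB c1 cs (rowAux p q cs) (S (p ++ [c1]) q) = (rowAux (p ++ [c1]) q cs).tail := by
  intro cs
  induction cs with
  | nil => intro q; simp [rowAux, innerB]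
  | cons c2 cs ih =>
      intro q
      rw [show rowAux p q (c2 :: cs) = S p q :: rowAux p (q ++ [c2]) cs from rfl,
          rowAux_head p (q ++ [c2]) cs]
      rw [innerB]
      rw [← rowAux_head p (q ++ [c2]) cs]
      have hlast : min (min (S p (q ++ [c2]) + 1) (S (p ++ [c1]) q + 1))
          (S p q + if c1 = c2 then 0 else 1) = S (p ++ [c1]) (q ++ [c2]) := by
        rw [S_snoc]
      rw [hlast, ih (q ++ [c2])]
      rw [show rowAux (p ++ [c1]) q (c2 :: cs) = S (p ++ [c1]) q :: rowAux (p ++ [c1]) (q ++ [c2]) cs from rfl]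
      rw [rowAux_head (p ++ [c1]) (q ++ [c2]) cs]
      simp

lemma rowsB_spec (w2 : List Char) : ∀ (cs p : List Char),
    rowsB w2 cs p.length (rowAux p [] w2) = rowAux (p ++ cs) [] w2 := by
  intro cs
  induction cs with
  | nil => intro p; simp [rowsB]
  | cons c1 cs ih =>
      intro p
      rw [rowsB]
      have hhd : ((p.length : Int) + 1) = S (p ++ [c1]) [] := by
        rw [S_nil_right]; simp
      rw [hhd, innerB_spec c1 p w2 [], ← rowAux_head (p ++ [c1]) [] w2]
      have := ih (p ++ [c1])
      simp only [List.length_append, List.length_cons, List.length_nil] at this ⊢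
      rw [show p.length + 1 = p.length + 1 + 0 from rfl] at this
      simpa [List.append_assoc] using this

lemma rowAux_zero : ∀ (cs q : List Char),
    rowAux [] q cs = (List.range (cs.length + 1)).map (fun k => ((q.length + k : Nat) : Int)) := by
  intro cs
  induction cs with
  | nil => intro q; simp [rowAux, S_nil_left]
  | cons c cs ih =>
      intro q
      rw [show rowAux [] q (c :: cs) = S [] q :: rowAux [] (q ++ [c]) cs from rfl, ih (q ++ [c])]
      conv_rhs => rw [show (c :: cs).length + 1 = cs.length + 1 + 1 from by simp, List.range_succ_eq_map]
      simp only [List.map_cons, List.map_map, Function.comp_def, S_nil_left]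
      refine List.cons_eq_cons.mpr ⟨by simp, ?_⟩
      apply List.map_congr_left
      intro a _
      simp [Nat.succ_eq_add_one]
      omega

lemma rowAux_getLastD (p : List Char) : ∀ (cs q : List Char) (d : Int),
    (rowAux p q cs).getLastD d = S p (q ++ cs) := by
  intro cs
  induction cs with
  | nil => intro q d; simp [rowAux]
  | cons c cs ih =>
      intro q d
      rw [show rowAux p q (c :: cs) = S p q :: rowAux p (q ++ [c]) cs from rfl]
      rw [List.getLastD_cons, ih (q ++ [c])]
      simp

lemma levB_eq_S (w1 w2 : List Char) : levB w1 w2 = S w1 w2 := by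
  have h0 : (List.range (w2.length + 1)).map Int.ofNat = rowAux [] [] w2 := by
    rw [rowAux_zero w2 []]
    apply List.map_congr_left
    intro a _
    simp
  show (rowsB w2 w1 0 ((List.range (w2.length + 1)).map Int.ofNat)).getLastD 0 = S w1 w2
  rw [h0, show (0 : Nat) = ([] : List Char).length from rfl, rowsB_spec w2 w1 [],
      rowAux_getLastD]
  norm_num

-- ---- putting the two loops side by side ----

lemma foldA_spec : ∀ (l : List (List Char × List Char)) (acc : Int) (m : MemoA), InvA m →
    (l.foldl (fun (st : Int × MemoA) p =>
        (st.1 + (levA p.1 p.2 st.2).1, (levA p.1 p.2 st.2).2)) (acc, m)).1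
      = acc + (l.map (fun p => S p.1 p.2)).sum := by
  intro l
  induction l with
  | nil => intro acc m _; simp
  | cons p rest ih =>
      intro acc m hInv
      have hg := levA_good (p.1.length + p.2.length) p.1 p.2 m le_rfl hInv
      simp only [List.foldl_cons, List.map_cons, List.sum_cons]
      rw [ih _ _ hg.2.1, hg.1]
      ring

lemma zip_index_fold (f : Int × MemoA → List Char → List Char → Int × MemoA) :
    ∀ (l1 l2 : List (List Char)) (st : Int × MemoA),
    (List.range (min l1.length l2.length)).foldl
        (fun st k => f st (l1.getD k []) (l2.getD k [])) st
      = (l1.zip l2).foldl (fun st p => f st p.1 p.2) st := by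
  intro l1
  induction l1 with
  | nil => intro l2 st; simp
  | cons x xs ih =>
      intro l2 st
      cases l2 with
      | nil => simp
      | cons y ys =>
          simp only [List.length_cons, Nat.succ_min_succ, List.range_succ_eq_map,
            List.foldl_cons, List.foldl_map, List.zip_cons_cons, List.getD_cons_zero,
            List.getD_cons_succ]
          exact ih ys (f st x y)

lemma InvA_empty : InvA PySem.Dict.empty := by
  intro k v hk
  simp [PySem.Dict.get?_empty] at hk

lemma main_fold (l1 l2 : List (List Char)) :
    (List.foldl (fun (st : Int × MemoA) i =>
        (st.1 + (levA (PySem.List.pyGetD l1 i []) (PySem.List.pyGetD l2 i []) st.2).1,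
         (levA (PySem.List.pyGetD l1 i []) (PySem.List.pyGetD l2 i []) st.2).2))
      (0, PySem.Dict.empty)
      (PySem.List.pyRange 0 (min (l1.length : Int) (l2.length : Int)))).1
    = (List.map (fun p => levB p.1 p.2) (l1.zip l2)).sum := by
  rw [show (min (l1.length : Int) (l2.length : Int))
      = ((min l1.length l2.length : Nat) : Int) from by push_cast; rfl]
  rw [PySem.List.pyRange_zero_nat, List.foldl_map]
  simp only [PySem.List.pyGetD_natCast]
  rw [zip_index_fold (fun st a b => (st.1 + (levA a b st.2).1, (levA a b st.2).2))]
  rw [foldA_spec _ 0 _ InvA_empty]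
  rw [show (List.map (fun p => levB p.1 p.2) (l1.zip l2))
      = List.map (fun p => S p.1 p.2) (l1.zip l2) from
    List.map_congr_left (fun p _ => levB_eq_S p.1 p.2)]
  ring

-- ===== VERDICT (by name: the statement is the Claim_ definition above) =====
theorem compareSentences_spec : Claim_equal_compareSentences := by
  intro s1 s2 _
  show compareSentences s1 s2 = compareSentences_alt s1 s2
  exact main_fold (PySem.Chars.splitOn s1.toList [' ']) (PySem.Chars.splitOn s2.toList [' '])
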